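-- pv_equiv track=rewrite | github.com/Odhiambo-20/Biometric-Key-Derivation1 | embedding.py | _min_poly
-- ===== SOURCE A (Python) =====
-- def _gf256_mul(a: int, b: int, p: int = 0x11D) -> int:
--     r = 0
--     while b:
--         if b & 1: r ^= a
--         a <<= 1
--         if a & 0x100: a ^= p
--         b >>= 1
--     return r
--
-- def _gf256_pow(base: int, exp: int) -> int:
--     r = 1
--     for _ in range(exp):
--         r = _gf256_mul(r, base)
--     return r
--
-- def _conj(e: int) -> list:
--     seen, x = [], e % 255
--     while x not in seen:
--         seen.append(x)
--         x = (x * 2) % 255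
--     return seen
--
-- def _min_poly(root: int) -> list:
--     poly = [1]
--     for e in _conj(root):
--         rv = _gf256_pow(2, e)
--         np_ = [0] * (len(poly) + 1)
--         for i, c in enumerate(poly):
--             np_[i]   ^= c
--             np_[i+1] ^= _gf256_mul(c, rv)
--         poly = np_
--     return [int(c & 1) for c in poly]
-- ===== SOURCE B (Python) =====
-- def _min_poly(root: int) -> list:
--     # exp[i] = 2^i in GF(256) mod 0x11D, built by repeated doubling (no generic power loop)
--     exp = []
--     x = 1
--     for _ in range(255):
--         exp.append(x)
--         x <<= 1
--         if x & 0x100: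
--             x ^= 0x11D
--     def mul(a, b):
--         # b < 256 always here, so a fixed 8-round shift/xor loop suffices
--         r = 0
--         for _ in range(8):
--             if b & 1:
--                 r ^= a
--             a <<= 1
--             if a & 0x100:
--                 a ^= 0x11D
--             b >>= 1
--         return r
--     e = root % 255
--     # the doubling orbit of e mod 255 is a pure cycle whose length divides 8
--     d = next(k for k in range(1, 9) if (e << k) % 255 == e)
--     poly = [1]
--     for i in range(d):
--         rv = exp[(e << i) % 255]
--         poly = [(poly[j] if j < len(poly) else 0)
--                 ^ mul(poly[j - 1] if j >= 1 else 0, rv)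
--                 for j in range(len(poly) + 1)]
--     return [c & 1 for c in poly]
-- ===== Notes on version B (the rewrite author's own statement) =====
-- stated objective: alternative
-- what changed: Replaces the repeated-multiply _gf256_pow loop with an exp table of all powers of two built by repeated doubling (rv becomes a table lookup), the membership-scan conjugacy loop with the doubling orbit listed directly up to its multiplicative order, the unbounded while-loop multiply with a fixed-round shift/xor loop, and the in-place xor polynomial update with a padded-shift comprehension.
import Mathlib
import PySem

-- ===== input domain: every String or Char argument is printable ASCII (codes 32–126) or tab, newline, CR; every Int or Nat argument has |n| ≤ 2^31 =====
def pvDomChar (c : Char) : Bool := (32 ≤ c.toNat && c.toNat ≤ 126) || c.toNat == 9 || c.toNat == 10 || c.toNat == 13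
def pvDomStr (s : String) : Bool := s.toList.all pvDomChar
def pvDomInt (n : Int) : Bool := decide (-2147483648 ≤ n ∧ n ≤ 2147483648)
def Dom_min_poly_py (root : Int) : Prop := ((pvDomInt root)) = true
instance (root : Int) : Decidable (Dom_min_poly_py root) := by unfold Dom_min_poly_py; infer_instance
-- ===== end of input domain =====

-- B replaces A's repeated-multiply power loop by an exp table built by doubling, the
-- membership-scan conjugacy loop by the doubling orbit listed up to its order, the while-loop
-- multiply by a fixed 8-round loop, and the in-place xor polynomial update by a comprehension
-- (alternative decomposition; not claimed faster).
-- All Python ints here are nonnegative (< 512) except root itself, so the ports track them as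
-- Nat; the single signed operation, root % 255, is taken exactly via PySem.Int.mod at entry.

-- ===== PORT A =====
-- while b: bit-serial multiply; fuel = b bounds the loop (b strictly shrinks by halving).
-- The p parameter of _gf256_mul is always its default 0x11D in this module; inlined.
def aGfMulGo (fuel a b r : Nat) : Nat :=
  match fuel with
  | 0 => r
  | fuel + 1 =>
    if b ≠ 0 then
      let r := if b &&& 1 ≠ 0 then r ^^^ a else r
      let a := a <<< 1
      let a := if a &&& 0x100 ≠ 0 then a ^^^ 0x11D else a
      aGfMulGo fuel a (b >>> 1) r
    else r

def aGf256Mul (a b : Nat) : Nat := aGfMulGo b a b 0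

def aGf256Pow (base exp : Nat) : Nat :=
  (List.range exp).foldl (fun r _ => aGf256Mul r base) 1

-- while x not in seen: fuel 256 (seen holds distinct residues < 255, so ≤ 255 iterations)
def aConjGo (fuel : Nat) (seen : List Nat) (x : Nat) : List Nat :=
  match fuel with
  | 0 => seen
  | fuel + 1 =>
    if x ∈ seen then seen else aConjGo fuel (seen ++ [x]) ((x * 2) % 255)

-- the inner 'for i, c in enumerate(poly)' loop of _min_poly (np_ indexing is always in range)
def aPolyStep (poly : List Nat) (rv : Nat) : List Nat :=
  poly.zipIdx.foldl (fun (np : List Nat) ic =>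
      let np := np.set ic.2 ((np.getD ic.2 0) ^^^ ic.1)
      np.set (ic.2 + 1) ((np.getD (ic.2 + 1) 0) ^^^ aGf256Mul ic.1 rv))
    (List.replicate (poly.length + 1) 0)

-- A's body after e := root % 255 (already a Nat here; the e % 255 of _conj is that same mod)
def aMain (e : Nat) : List Int :=
  ((aConjGo 256 [] e).foldl (fun poly c => aPolyStep poly (aGf256Pow 2 c)) [1]).map
    (fun c => ((c &&& 1 : Nat) : Int))

def min_poly_py (root : Int) : List Int :=
  aMain ((PySem.Int.mod root 255).toNat)

-- ===== PORT B =====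
-- exp.append(x); x <<= 1; reduce — one pass, state (exp, x)
def bExpTable : List Nat :=
  ((List.range 255).foldl (fun (st : List Nat × Nat) _ =>
      let exp := st.1 ++ [st.2]
      let x := st.2 <<< 1
      let x := if x &&& 0x100 ≠ 0 then x ^^^ 0x11D else x
      (exp, x))
    ([], 1)).1

-- fixed 8-round multiply, state (r, a, b)
def bGfMul (a b : Nat) : Nat :=
  ((List.range 8).foldl (fun (st : Nat × Nat × Nat) _ =>
      let r := if st.2.2 &&& 1 ≠ 0 then st.1 ^^^ st.2.1 else st.1
      let a := st.2.1 <<< 1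
      let a := if a &&& 0x100 ≠ 0 then a ^^^ 0x11D else a
      (r, a, st.2.2 >>> 1))
    (0, a, b)).1

-- d = next(k for k in range(1, 9) if (e << k) % 255 == e); always found since the order divides 8
def bOrd (e : Nat) : Nat :=
  (((List.range' 1 8).find? (fun k => (e <<< k) % 255 == e)).getD 8)

-- the comprehension building poly * (x + rv)
def bPolyStep (poly : List Nat) (rv : Nat) : List Nat :=
  (List.range (poly.length + 1)).map (fun j =>
    (if j < poly.length then poly.getD j 0 else 0) ^^^
      bGfMul (if 1 ≤ j then poly.getD (j - 1) 0 else 0) rv)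

-- B's body after e := root % 255
def bMain (e : Nat) : List Int :=
  (((List.range (bOrd e)).foldl (fun poly i =>
      bPolyStep poly (bExpTable.getD ((e <<< i) % 255) 0)) [1])).map
    (fun c => ((c &&& 1 : Nat) : Int))

def min_poly_py_alt (root : Int) : List Int :=
  bMain ((PySem.Int.mod root 255).toNat)

-- ===== PRECONDITION & SPEC =====
def Spec_min_poly_py (root : Int) (out : List Int) : Prop := out = min_poly_py_alt root
instance (root : Int) (out : List Int) : Decidable (Spec_min_poly_py root out) := by unfold Spec_min_poly_py; infer_instance

-- ===== CLAIM (what is proved, stated in full; the proofs are below) =====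
def Claim_equal_min_poly_py : Prop := ∀ (root : Int), Dom_min_poly_py root → Spec_min_poly_py root (min_poly_py root)

-- ===== LEMMAS AND PROOFS =====

-- one doubling step 'a <<= 1; if a & 0x100: a ^= 0x11D' (proof-side abbreviation)
def xtv (a : Nat) : Nat :=
  let a := a <<< 1
  if a &&& 0x100 ≠ 0 then a ^^^ 0x11D else a

-- the 8-round recursion the two multiply loops both compute
def pvRounds (n a b r : Nat) : Nat :=
  match n with
  | 0 => r
  | n + 1 => pvRounds n (xtv a) (b >>> 1) (if b &&& 1 ≠ 0 then r ^^^ a else r)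

theorem aGo_b_zero (fuel a r : Nat) : aGfMulGo fuel a 0 r = r := by
  cases fuel <;> simp [aGfMulGo]

theorem rounds_b_zero (n : Nat) : ∀ a r, pvRounds n a 0 r = r := by
  induction n with
  | zero => intro a r; rfl
  | succ n ih => intro a r; simp [pvRounds, ih]

theorem go_eq_rounds (n : Nat) : ∀ b, b < 2 ^ n → ∀ a r fuel, b ≤ fuel →
    aGfMulGo fuel a b r = pvRounds n a b r := by
  induction n with
  | zero => intro b hb a r fuel _; interval_cases b; exact aGo_b_zero fuel a r
  | succ n ih =>
    intro b hb a r fuel hf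
    by_cases h0 : b = 0
    · subst h0; rw [aGo_b_zero, rounds_b_zero]
    · obtain ⟨f, rfl⟩ : ∃ f, fuel = f + 1 := ⟨fuel - 1, by omega⟩
      have hdiv : b >>> 1 = b / 2 := Nat.shiftRight_one b
      simp only [aGfMulGo, pvRounds, if_pos h0, xtv]
      exact ih (b >>> 1) (by rw [hdiv]; omega) _ _ f (by rw [hdiv]; omega)

theorem mulEq (a b : Nat) (hb : b < 256) : aGf256Mul a b = bGfMul a b := by
  have h : bGfMul a b = pvRounds 8 a b 0 := rfl
  rw [h, aGf256Mul]
  exact go_eq_rounds 8 b hb a 0 b le_rfl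

theorem gfMulTwo (x : Nat) : aGf256Mul x 2 = xtv x := by
  simp [aGf256Mul, aGfMulGo, xtv]

theorem go_a_zero (fuel : Nat) : ∀ b r, aGfMulGo fuel 0 b r = r := by
  induction fuel with
  | zero => intro b r; rfl
  | succ fuel ih => intro b r; simp [aGfMulGo, ih]

theorem mul_zero_a (b : Nat) : aGf256Mul 0 b = 0 := go_a_zero b b 0

set_option maxRecDepth 4000 in
theorem xtv_lt : ∀ a, a < 256 → xtv a < 256 := by decide

theorem gfPowSucc (c : Nat) : aGf256Pow 2 (c + 1) = aGf256Mul (aGf256Pow 2 c) 2 := by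
  simp [aGf256Pow, List.range_succ]

theorem powBound (c : Nat) : aGf256Pow 2 c < 256 := by
  induction c with
  | zero => decide
  | succ c ih => rw [gfPowSucc, gfMulTwo]; exact xtv_lt _ ih

theorem tblSpec (k : Nat) :
    (List.range k).foldl (fun (st : List Nat × Nat) _ =>
        let exp := st.1 ++ [st.2]
        let x := st.2 <<< 1
        let x := if x &&& 0x100 ≠ 0 then x ^^^ 0x11D else x
        (exp, x))
      ([], 1)
    = ((List.range k).map (aGf256Pow 2), aGf256Pow 2 k) := by
  induction k with
  | zero => rfl
  | succ k ih =>
    rw [List.range_succ, List.foldl_append, ih, List.map_append]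
    simp only [List.foldl_cons, List.foldl_nil]
    refine Prod.ext (by simp) ?_
    rw [gfPowSucc, gfMulTwo]
    rfl

theorem tableEq (c : Nat) (hc : c < 255) : bExpTable.getD c 0 = aGf256Pow 2 c := by
  rw [bExpTable, tblSpec]
  rw [List.getD_eq_getElem?_getD, List.getElem?_map, List.getElem?_range hc]
  rfl

-- the 255 doubling orbits: A's membership-scan loop lists exactly the cycle of length bOrd e
set_option maxRecDepth 20000 in
theorem conj_orbit : ∀ e, e < 255 →
    aConjGo 256 [] e = (List.range (bOrd e)).map (fun i => (e <<< i) % 255) := by decide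

-- the convolution list A's in-place loop builds: head m, then carried muls
def conv (rv m : Nat) : List Nat → List Nat
  | [] => [m]
  | c :: cs => (m ^^^ c) :: conv rv (aGf256Mul c rv) cs

theorem getD_append_len (front : List Nat) (x : Nat) (rest : List Nat) :
    (front ++ x :: rest).getD front.length 0 = x := by
  induction front with
  | nil => rfl
  | cons f fs ih => simp

theorem set_append_len (front : List Nat) (x : Nat) (rest : List Nat) (y : Nat) :
    (front ++ x :: rest).set front.length y = front ++ y :: rest := by
  induction front with
  | nil => rfl
  | cons f fs ih => simp [ih]

theorem fold_conv (rv : Nat) : ∀ (cs front : List Nat) (m : Nat),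
    (List.zipIdx cs front.length).foldl (fun (np : List Nat) ic =>
        let np := np.set ic.2 ((np.getD ic.2 0) ^^^ ic.1)
        np.set (ic.2 + 1) ((np.getD (ic.2 + 1) 0) ^^^ aGf256Mul ic.1 rv))
      (front ++ m :: List.replicate cs.length 0)
    = front ++ conv rv m cs := by
  intro cs
  induction cs with
  | nil => intro front m; simp [conv]
  | cons c cs ih =>
    intro front m
    rw [List.zipIdx_cons, List.foldl_cons]
    simp only [List.length_cons, List.replicate_succ]
    rw [getD_append_len, set_append_len]
    have hlen : front.length + 1 = (front ++ [m ^^^ c]).length := by simp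
    have h2 : front ++ (m ^^^ c) :: 0 :: List.replicate cs.length 0
        = (front ++ [m ^^^ c]) ++ 0 :: List.replicate cs.length 0 := by simp
    rw [h2, hlen, getD_append_len, set_append_len, Nat.zero_xor]
    rw [ih (front ++ [m ^^^ c]) (aGf256Mul c rv), conv]
    simp

theorem aPolyStep_conv (poly : List Nat) (rv : Nat) :
    aPolyStep poly rv = conv rv 0 poly := by
  have h := fold_conv rv poly [] 0
  simpa [aPolyStep, List.replicate_succ] using h

theorem conv_map (rv : Nat) : ∀ (cs : List Nat) (q : Nat),
    conv rv (aGf256Mul q rv) cs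
    = (List.range (cs.length + 1)).map (fun j =>
        (if j < cs.length then cs.getD j 0 else 0) ^^^ aGf256Mul ((q :: cs).getD j 0) rv) := by
  intro cs
  induction cs with
  | nil => intro q; simp [conv]
  | cons c cs ih =>
    intro q
    rw [conv, List.length_cons, List.range_succ_eq_map, List.map_cons, List.map_map]
    refine List.cons_eq_cons.mpr ⟨by simp [Nat.xor_comm], ?_⟩
    rw [ih c]
    refine congrFun (congrArg List.map (funext fun j => ?_)) _
    simp [Function.comp]

theorem stepEq (rv : Nat) (hrv : rv < 256) (poly : List Nat) :
    aPolyStep poly rv = bPolyStep poly rv := by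
  have h := conv_map rv poly 0
  rw [mul_zero_a] at h
  rw [aPolyStep_conv, h, bPolyStep]
  refine congrFun (congrArg List.map (funext fun j => ?_)) _
  rw [← mulEq _ rv hrv]
  cases j with
  | zero => simp
  | succ j => simp

theorem mainEq (e : Nat) (he : e < 255) : aMain e = bMain e := by
  rw [aMain, bMain, conj_orbit e he, List.foldl_map]
  have hstep : (fun (poly : List Nat) (i : Nat) => aPolyStep poly (aGf256Pow 2 ((e <<< i) % 255)))
      = fun (poly : List Nat) (i : Nat) => bPolyStep poly (bExpTable.getD ((e <<< i) % 255) 0) := by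
    funext poly i
    rw [tableEq _ (Nat.mod_lt _ (by norm_num))]
    exact stepEq _ (powBound _) poly
  rw [hstep]

-- ===== VERDICT (by name: the statement is the Claim_ definition above) =====
theorem min_poly_py_spec : Claim_equal_min_poly_py := by
  intro root _
  unfold Spec_min_poly_py min_poly_py min_poly_py_alt
  apply mainEq
  have hm : PySem.Int.mod root 255 = root % 255 := PySem.Int.mod_eq_emod_of_pos (by norm_num)
  rw [hm]; omega
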